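-- pv_equiv track=rewrite | github.com/BrettRey/erdos-problem-993 | conjecture_a_decimated_bridge_diagnostics.py | has_private_neighbor_for_all_subsets
-- ===== SOURCE A (Python) =====
-- def has_private_neighbor_for_all_subsets(h_masks: list[int]) -> tuple[bool, int, int]:
--     """Return (ok, subsets_checked, bad_mask)."""
--     m = len(h_masks)
--     if m == 0:
--         return True, 0, 0
--
--     h_pow = 1 << m
--     nbr_mask = [0] * h_pow
--     checked = 0
--     for s in range(1, h_pow):
--         lsb = s & -s
--         b = lsb.bit_length() - 1
--         prev = s ^ lsb
--         nbr_mask[s] = nbr_mask[prev] | h_masks[b]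
--         checked += 1
--
--         rem = s
--         has_private = False
--         while rem:
--             bit = rem & -rem
--             i = bit.bit_length() - 1
--             rem ^= bit
--             if h_masks[i] & ~nbr_mask[s ^ bit]:
--                 has_private = True
--                 break
--         if not has_private:
--             return False, checked, s
--
--     return True, checked, 0
-- ===== SOURCE B (Python) =====
-- def or_except(h_masks, members, i):
--     """OR of h_masks[j] over the members j other than i (recursive on the member list)."""
--     if not members:
--         return 0
--     rest = or_except(h_masks, members[1:], i)
--     return rest if members[0] == i else rest | h_masks[members[0]]
--
--
-- def has_private_neighbor_for_all_subsets(h_masks: list[int]) -> tuple[bool, int, int]: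
--     """Return (ok, subsets_checked, bad_mask)."""
--     m = len(h_masks)
--     if m == 0:
--         return True, 0, 0
--     full = (1 << m) - 1
--     for s in range(1, full + 1):
--         members = [i for i in range(m) if (s >> i) & 1]
--         if not any(h_masks[i] & ~or_except(h_masks, members, i) for i in members):
--             return False, s, s
--     return True, full, 0
-- ===== Notes on version B (the rewrite author's own statement) =====
-- stated objective: simpler
-- what changed: B removes A's 2^m-entry nbr_mask DP table and low-bit arithmetic: it walks subsets in the same numeric order but recomputes, per subset member, the OR of the other members' masks directly from the subset's member-index list, returning (False, s, s) at the first failing subset without a separate checked counter.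
import Mathlib
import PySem

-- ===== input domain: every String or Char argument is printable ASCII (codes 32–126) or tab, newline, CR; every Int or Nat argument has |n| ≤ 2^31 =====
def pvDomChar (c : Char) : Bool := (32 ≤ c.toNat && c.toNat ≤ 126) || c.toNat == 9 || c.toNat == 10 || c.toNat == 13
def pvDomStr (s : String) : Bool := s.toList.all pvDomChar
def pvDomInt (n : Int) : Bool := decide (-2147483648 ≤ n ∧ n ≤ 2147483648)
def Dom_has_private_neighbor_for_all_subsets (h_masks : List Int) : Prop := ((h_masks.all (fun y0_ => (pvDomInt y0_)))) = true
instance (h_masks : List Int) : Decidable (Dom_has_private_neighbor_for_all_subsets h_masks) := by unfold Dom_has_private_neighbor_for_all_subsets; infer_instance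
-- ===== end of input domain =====

-- B drops A's memoised nbr_mask DP table and instead, for each subset, recomputes each member's
-- "others" OR directly from the member list (objective: simpler — no 2^m-entry table, no bit tricks).

-- ===== PORT A =====
-- inner `while rem:` loop of A; `fuel` only makes the recursion structural (called with fuel = rem,
-- and rem strictly decreases each step, so the fuel-0 branch is never taken on the executed paths)
def pvAInner (h : List Int) (nbr : List Int) (s : Nat) (rem : Nat) (fuel : Nat) : Bool :=
  match fuel with
  | 0 => false
  | fuel + 1 =>
    if rem ≠ 0 then
      let bit : Int := PySem.Int.band (↑rem) (-(rem : Int))          -- bit = rem & -rem (> 0)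
      let i : Nat := PySem.Int.bitLength bit - 1                     -- i = bit.bit_length() - 1
      let rem' : Nat := rem ^^^ bit.toNat                            -- rem ^= bit (both ≥ 0: exact)
      -- `if h_masks[i] & ~nbr_mask[s ^ bit]:` — i < len(h_masks) and s ^ bit < len(nbr_mask)
      -- always hold on the executed paths, so the getD defaults are never consulted
      if PySem.Int.band (h.getD i 0) (Int.not (nbr.getD (s ^^^ bit.toNat) 0)) ≠ 0 then true
      else pvAInner h nbr s rem' fuel
    else false

-- outer `for s in range(1, h_pow):` loop of A; cnt = number of remaining values of s
def pvAGo (h : List Int) (nbr : List Int) (checked : Int) (s : Nat) (cnt : Nat) : Bool × Int × Int :=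
  match cnt with
  | 0 => (true, checked, 0)
  | cnt + 1 =>
    let lsb : Int := PySem.Int.band (↑s) (-(s : Int))                -- lsb = s & -s (> 0)
    let b : Nat := PySem.Int.bitLength lsb - 1                       -- b = lsb.bit_length() - 1
    let prev : Nat := s ^^^ lsb.toNat                                -- prev = s ^ lsb (both ≥ 0: exact)
    let nbr' := nbr.set s (PySem.Int.bor (nbr.getD prev 0) (h.getD b 0))  -- nbr_mask[s] = nbr_mask[prev] | h_masks[b]
    let checked' := checked + 1
    if pvAInner h nbr' s s s then pvAGo h nbr' checked' (s + 1) cnt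
    else (false, checked', (s : Int))

def has_private_neighbor_for_all_subsets (h_masks : List Int) : Bool × Int × Int :=
  let m := h_masks.length
  if m = 0 then (true, 0, 0)
  else
    let hpow := 1 <<< m
    pvAGo h_masks (List.replicate hpow 0) 0 1 (hpow - 1)

-- ===== PORT B =====
-- or_except: OR of h_masks[j] over the members j other than i (recursive on the member list)
def pvOrExcept (h : List Int) (members : List Nat) (i : Nat) : Int :=
  match members with
  | [] => 0
  | j :: rest =>
    let r := pvOrExcept h rest i
    if j = i then r else PySem.Int.bor r (h.getD j 0)

-- body of B's `for s …` loop: does subset s FAIL the private-neighbour test?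
def pvBFails (h : List Int) (m : Nat) (s : Nat) : Bool :=
  let members := (List.range m).filter (fun i => decide ((s >>> i) &&& 1 = 1))
  !(members.any (fun i => decide (PySem.Int.band (h.getD i 0) (Int.not (pvOrExcept h members i)) ≠ 0)))

def has_private_neighbor_for_all_subsets_alt (h_masks : List Int) : Bool × Int × Int :=
  let m := h_masks.length
  if m = 0 then (true, 0, 0)
  else
    let full := (1 <<< m) - 1
    match (List.range' 1 full).find? (pvBFails h_masks m) with
    | some s => (false, (s : Int), (s : Int))
    | none => (true, (full : Int), 0)

-- ===== PRECONDITION & SPEC =====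
def Spec_has_private_neighbor_for_all_subsets (h_masks : List Int) (out : Bool × Int × Int) : Prop := out = has_private_neighbor_for_all_subsets_alt h_masks
instance (h_masks : List Int) (out : Bool × Int × Int) : Decidable (Spec_has_private_neighbor_for_all_subsets h_masks out) := by unfold Spec_has_private_neighbor_for_all_subsets; infer_instance

-- ===== CLAIM (what is proved, stated in full; the proofs are below) =====
def Claim_equal_has_private_neighbor_for_all_subsets : Prop := ∀ (h_masks : List Int), Dom_has_private_neighbor_for_all_subsets h_masks → Spec_has_private_neighbor_for_all_subsets h_masks (has_private_neighbor_for_all_subsets h_masks)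

-- ===== LEMMAS AND PROOFS =====

def pvLowIdx (n : Nat) : Nat :=
  if h : n = 0 ∨ n % 2 = 1 then 0 else pvLowIdx (n / 2) + 1
decreasing_by
  have : n ≠ 0 := fun hn => h (Or.inl hn)
  omega
theorem pvLowIdx_odd {n : Nat} (h : n % 2 = 1) : pvLowIdx n = 0 := by
  rw [pvLowIdx]; simp [h]
theorem pvLowIdx_even {n : Nat} (h0 : n ≠ 0) (h : n % 2 = 0) :
    pvLowIdx n = pvLowIdx (n / 2) + 1 := by
  rw [pvLowIdx]; simp [h0]; omega

theorem pv_testBit_lowIdx : ∀ n : Nat, 0 < n → n.testBit (pvLowIdx n) = true := by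
  intro n
  induction n using Nat.strong_induction_on with
  | _ n ih =>
    intro hn
    rcases Nat.even_or_odd n with he | ho
    · have h2 : n % 2 = 0 := Nat.even_iff.mp he
      rw [pvLowIdx_even (by omega) h2, Nat.testBit_succ]
      exact ih (n / 2) (by omega) (by omega)
    · have h2 : n % 2 = 1 := Nat.odd_iff.mp ho
      rw [pvLowIdx_odd h2, Nat.testBit_zero]
      simp [h2]

theorem pv_testBit_below_lowIdx : ∀ n : Nat, ∀ j, j < pvLowIdx n → n.testBit j = false := by
  intro n
  induction n using Nat.strong_induction_on with
  | _ n ih =>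
    intro j hj
    by_cases h0 : n = 0
    · simp [h0]
    rcases Nat.even_or_odd n with he | ho
    · have h2 : n % 2 = 0 := Nat.even_iff.mp he
      rw [pvLowIdx_even h0 h2] at hj
      match j with
      | 0 => rw [Nat.testBit_zero]; simp [h2]
      | j + 1 =>
        rw [Nat.testBit_succ]
        exact ih (n / 2) (by omega) j (by omega)
    · have h2 : n % 2 = 1 := Nat.odd_iff.mp ho
      rw [pvLowIdx_odd h2] at hj; omega

theorem pv_lowIdx_eq : ∀ n t : Nat, n.testBit t = true →
    (∀ j, j < t → n.testBit j = false) → pvLowIdx n = t := by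
  intro n
  induction n using Nat.strong_induction_on with
  | _ n ih =>
    intro t ht hb
    have h0 : n ≠ 0 := by
      intro h; rw [h] at ht; simp [Nat.zero_testBit] at ht
    rcases Nat.even_or_odd n with he | ho
    · have h2 : n % 2 = 0 := Nat.even_iff.mp he
      match t with
      | 0 => rw [Nat.testBit_zero] at ht; simp [h2] at ht
      | t + 1 =>
        rw [pvLowIdx_even h0 h2]
        have := ih (n / 2) (by omega) t (by rw [← Nat.testBit_succ]; exact ht)
          (fun j hj => by rw [← Nat.testBit_succ]; exact hb (j + 1) (by omega))
        omega
    · have h2 : n % 2 = 1 := Nat.odd_iff.mp ho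
      match t with
      | 0 => exact pvLowIdx_odd h2
      | t + 1 =>
        have := hb 0 (by omega)
        rw [Nat.testBit_zero] at this; simp [h2] at this
theorem pv_xor_two_pow : ∀ (n : Nat) (i : Nat), n.testBit i = true → n ^^^ 2 ^ i = n - 2 ^ i := by
  intro n
  induction n using Nat.strong_induction_on with
  | _ n ih =>
    intro i hi
    have hge : 2 ^ i ≤ n := Nat.ge_two_pow_of_testBit hi
    apply Nat.eq_of_testBit_eq
    intro j
    match i, j with
    | 0, 0 =>
      rw [Nat.testBit_zero] at hi
      have h2 : n % 2 = 1 := by simpa using hi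
      rw [Nat.testBit_xor, pow_zero, Nat.testBit_zero, Nat.testBit_zero, Nat.testBit_zero]
      have h3 : (n - 1) % 2 = 0 := by omega
      simp [h2, h3]
    | 0, j + 1 =>
      rw [Nat.testBit_zero] at hi
      have h2 : n % 2 = 1 := by simpa using hi
      rw [Nat.testBit_xor, Nat.testBit_succ, Nat.testBit_succ, Nat.testBit_succ]
      have e1 : (1 : Nat) / 2 = 0 := by norm_num
      have e2 : (n - 1) / 2 = n / 2 := by omega
      rw [pow_zero, e1, e2, Nat.zero_testBit]
      simp
    | i + 1, 0 =>
      rw [Nat.testBit_xor, Nat.testBit_zero, Nat.testBit_zero, Nat.testBit_zero]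
      have h2 : 2 ^ (i + 1) % 2 = 0 := by
        have : (2:Nat) ∣ 2 ^ (i+1) := dvd_pow_self 2 (by omega)
        omega
      have : (n - 2 ^ (i + 1)) % 2 = n % 2 := by omega
      simp_all
    | i + 1, j + 1 =>
      have hsucc : (n / 2).testBit i = true := by rw [← Nat.testBit_succ]; exact hi
      have hge' : 2 ^ i ≤ n / 2 := Nat.ge_two_pow_of_testBit hsucc
      have hpow2 : 2 ^ (i + 1) % 2 = 0 := by
        have : (2:Nat) ∣ 2 ^ (i+1) := dvd_pow_self 2 (by omega)
        omega
      rw [Nat.testBit_xor, Nat.testBit_succ, Nat.testBit_succ, Nat.testBit_succ]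
      have e1 : 2 ^ (i + 1) / 2 = 2 ^ i := by
        simp [pow_succ]
      have e2 : (n - 2 ^ (i + 1)) / 2 = n / 2 - 2 ^ i := by
        have hp : 2 ^ (i + 1) = 2 * 2 ^ i := by rw [pow_succ]; ring
        omega
      have hp0 : 0 < 2 ^ (i + 1) := Nat.two_pow_pos _
      rw [e1, e2, ← Nat.testBit_xor, ih (n / 2) (by omega) i hsucc]

theorem pv_land_pred : ∀ n : Nat, 0 < n → n &&& (n - 1) = n - 2 ^ pvLowIdx n := by
  intro n
  induction n using Nat.strong_induction_on with
  | _ n ih =>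
    intro hn
    rcases Nat.even_or_odd n with he | ho
    · have h2 : n % 2 = 0 := Nat.even_iff.mp he
      have hrec := ih (n / 2) (by omega) (by omega)
      have hge : 2 ^ pvLowIdx (n / 2) ≤ n / 2 :=
        Nat.ge_two_pow_of_testBit (pv_testBit_lowIdx (n / 2) (by omega))
      rw [pvLowIdx_even (by omega) h2]
      apply Nat.eq_of_testBit_eq
      intro j
      have hp : 2 ^ (pvLowIdx (n / 2) + 1) = 2 * 2 ^ pvLowIdx (n / 2) := by rw [pow_succ]; ring
      match j with
      | 0 =>
        rw [Nat.testBit_land, Nat.testBit_zero, Nat.testBit_zero, Nat.testBit_zero]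
        have e : (n - 2 ^ (pvLowIdx (n / 2) + 1)) % 2 = 0 := by omega
        simp [h2, e]
      | j + 1 =>
        rw [Nat.testBit_land, Nat.testBit_succ, Nat.testBit_succ, Nat.testBit_succ]
        have e1 : (n - 1) / 2 = n / 2 - 1 := by omega
        have e2 : (n - 2 ^ (pvLowIdx (n / 2) + 1)) / 2 = n / 2 - 2 ^ pvLowIdx (n / 2) := by omega
        rw [e1, e2, ← Nat.testBit_land, hrec]
    · have h2 : n % 2 = 1 := Nat.odd_iff.mp ho
      rw [pvLowIdx_odd h2, pow_zero]
      apply Nat.eq_of_testBit_eq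
      intro j
      match j with
      | 0 =>
        rw [Nat.testBit_land, Nat.testBit_zero, Nat.testBit_zero]
        have e : (n - 1) % 2 = 0 := by omega
        simp [e]
      | j + 1 =>
        rw [Nat.testBit_land, Nat.testBit_succ, Nat.testBit_succ]
        have e : (n - 1) / 2 = n / 2 := by omega
        rw [e]
        simp

theorem pv_band_neg {n : Nat} (hn : 0 < n) :
    PySem.Int.band (↑n) (-(n : Int)) = ((2 ^ pvLowIdx n : Nat) : Int) := by
  have h1 : ¬ (0 ≤ -(n : Int)) := by omega
  rw [PySem.Int.band]
  simp only [Int.natCast_nonneg, if_true, h1, if_false]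
  have e1 : (-(-(n : Int)) - 1).toNat = n - 1 := by omega
  have e2 : ((n : Int)).toNat = n := by omega
  rw [e1, e2, pv_land_pred n hn]
  have hge : 2 ^ pvLowIdx n ≤ n := Nat.ge_two_pow_of_testBit (pv_testBit_lowIdx n hn)
  rw [Nat.sub_sub_self hge]

theorem pv_bitLength_two_pow (t : Nat) : PySem.Int.bitLength ((2 ^ t : Nat) : Int) = t + 1 := by
  induction t with
  | zero =>
    rw [PySem.Int.bitLength_natCast (by norm_num)]
    norm_num
  | succ t ih =>
    rw [PySem.Int.bitLength_natCast (Nat.two_pow_pos _)]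
    have e : 2 ^ (t + 1) / 2 = 2 ^ t := by simp [pow_succ]
    rw [e, ih]

def pvOrSub (h : List Int) (n : Nat) : Int :=
  if hn : n = 0 then 0
  else PySem.Int.bor (pvOrSub h (n ^^^ 2 ^ pvLowIdx n)) (h.getD (pvLowIdx n) 0)
decreasing_by
  have h1 := pv_testBit_lowIdx n (by omega)
  have h2 := Nat.ge_two_pow_of_testBit h1
  rw [pv_xor_two_pow n _ h1]
  have : 0 < 2 ^ pvLowIdx n := Nat.two_pow_pos _
  omega

def pvBits (n : Nat) : List Nat :=
  if hn : n = 0 then []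
  else pvLowIdx n :: pvBits (n ^^^ 2 ^ pvLowIdx n)
decreasing_by
  have h1 := pv_testBit_lowIdx n (by omega)
  have h2 := Nat.ge_two_pow_of_testBit h1
  rw [pv_xor_two_pow n _ h1]
  have : 0 < 2 ^ pvLowIdx n := Nat.two_pow_pos _
  omega

-- bits of n with the lowest set bit removed
theorem pv_testBit_strip {n : Nat} (hn : n ≠ 0) (j : Nat) :
    (n ^^^ 2 ^ pvLowIdx n).testBit j = (n.testBit j && !(j = pvLowIdx n : Bool)) := by
  rw [Nat.testBit_xor, Nat.testBit_two_pow]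
  by_cases hj : j = pvLowIdx n
  · subst hj; simp [pv_testBit_lowIdx n (by omega)]
  · have hj2 : pvLowIdx n ≠ j := fun h => hj h.symm
    simp [hj, hj2]

theorem pv_strip_lt {n : Nat} (hn : n ≠ 0) : n ^^^ 2 ^ pvLowIdx n < n := by
  have h1 := pv_testBit_lowIdx n (by omega)
  have h2 := Nat.ge_two_pow_of_testBit h1
  rw [pv_xor_two_pow n _ h1]
  have : 0 < 2 ^ pvLowIdx n := Nat.two_pow_pos _
  omega

theorem pv_mem_bits : ∀ n i, i ∈ pvBits n ↔ n.testBit i = true := by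
  intro n
  induction n using Nat.strong_induction_on with
  | _ n ih =>
    intro i
    by_cases hn : n = 0
    · subst hn; rw [pvBits]; simp [Nat.zero_testBit]
    rw [pvBits]; simp only [hn, dite_false, List.mem_cons]
    rw [ih _ (pv_strip_lt hn), pv_testBit_strip hn]
    by_cases hi : i = pvLowIdx n
    · subst hi; simp [pv_testBit_lowIdx n (by omega)]
    · simp [hi]

theorem pv_filter_range_eq_bits : ∀ n m, n < 2 ^ m →
    (List.range m).filter (fun i => n.testBit i) = pvBits n := by
  intro n
  induction n using Nat.strong_induction_on with
  | _ n ih =>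
    intro m hnm
    by_cases hn : n = 0
    · subst hn; rw [pvBits]
      simp [List.filter_eq_nil_iff, Nat.zero_testBit]
    have h1 := pv_testBit_lowIdx n (by omega)
    have htm : pvLowIdx n < m := by
      by_contra hx
      have : n < 2 ^ pvLowIdx n :=
        lt_of_lt_of_le hnm (Nat.pow_le_pow_right (by norm_num) (by omega))
      rw [Nat.testBit_lt_two_pow this] at h1; exact Bool.noConfusion h1
    rw [pvBits]; simp only [hn, dite_false]
    have hrec := ih _ (pv_strip_lt hn) m (lt_of_le_of_lt (Nat.le_of_lt (pv_strip_lt hn)) hnm)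
    set t := pvLowIdx n with ht
    have hsplit : List.range m = List.range' 0 t ++ (t :: List.range' (t + 1) (m - t - 1)) := by
      rw [List.range_eq_range']
      have h3 : (t :: List.range' (t + 1) (m - t - 1)) = List.range' t (m - t) := by
        rw [← List.range'_succ]
        congr 1; omega
      rw [h3]
      have h4 := @List.range'_append 0 t (m - t) 1
      simp at h4
      rw [h4]
      congr 1; omega
    have hlow : ∀ p : Nat → Bool, (∀ j, j < t → p j = false) →
        (List.range' 0 t).filter p = [] := by
      intro p hp
      rw [List.filter_eq_nil_iff]
      intro a ha
      rw [List.mem_range'_1] at ha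
      simp [hp a (by omega)]
    have hnt : (n ^^^ 2 ^ t).testBit t = false := by
      rw [pv_testBit_strip hn, ← ht]; simp
    rw [hsplit, List.filter_append,
        hlow _ (fun j hj => pv_testBit_below_lowIdx n j hj), List.nil_append,
        List.filter_cons_of_pos (by simp [h1, ← ht])]
    congr 1
    rw [← hrec, hsplit, List.filter_append,
        hlow _ (fun j hj => by
          rw [pv_testBit_strip hn]
          simp [pv_testBit_below_lowIdx n j hj]),
        List.nil_append, List.filter_cons_of_neg (by simpa using hnt)]
    apply List.filter_congr
    intro x hx
    rw [List.mem_range'_1] at hx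
    rw [pv_testBit_strip hn]
    have hxt : x ≠ t := by omega
    simp [hxt, ← ht]


theorem pv_orExcept_notMem (h : List Int) : ∀ l (i : Nat), i ∉ l →
    pvOrExcept h l i = l.foldr (fun j acc => PySem.Int.bor acc (h.getD j 0)) 0 := by
  intro l
  induction l with
  | nil => intro i _; rfl
  | cons j rest ih =>
    intro i hi
    simp only [List.mem_cons, not_or] at hi
    simp only [pvOrExcept, List.foldr_cons]
    rw [if_neg (fun hh => hi.1 hh.symm), ih i hi.2]

theorem pv_foldr_bits (h : List Int) : ∀ n,
    (pvBits n).foldr (fun j acc => PySem.Int.bor acc (h.getD j 0)) 0 = pvOrSub h n := by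
  intro n
  induction n using Nat.strong_induction_on with
  | _ n ih =>
    by_cases hn : n = 0
    · subst hn; rw [pvBits, pvOrSub]; simp
    rw [pvBits, pvOrSub]
    simp only [hn, dite_false, List.foldr_cons]
    rw [ih _ (pv_strip_lt hn)]

theorem pv_orExcept_bits (h : List Int) : ∀ n i, n.testBit i = true →
    pvOrExcept h (pvBits n) i = pvOrSub h (n ^^^ 2 ^ i) := by
  intro n
  induction n using Nat.strong_induction_on with
  | _ n ih =>
    intro i hi
    have hn : n ≠ 0 := by
      intro hh; subst hh; rw [Nat.zero_testBit] at hi; exact Bool.noConfusion hi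
    rw [pvBits]
    simp only [hn, dite_false, pvOrExcept]
    by_cases hit : pvLowIdx n = i
    · subst hit
      rw [if_pos rfl]
      have hnotmem : pvLowIdx n ∉ pvBits (n ^^^ 2 ^ pvLowIdx n) := by
        rw [pv_mem_bits, pv_testBit_strip hn]
        simp
      rw [pv_orExcept_notMem h _ _ hnotmem, pv_foldr_bits]
    · rw [if_neg hit]
      have hit' : i ≠ pvLowIdx n := fun hh => hit hh.symm
      have hi' : (n ^^^ 2 ^ pvLowIdx n).testBit i = true := by
        rw [pv_testBit_strip hn]
        simp [hi, hit']
      rw [ih _ (pv_strip_lt hn) i hi']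
      -- show pvOrSub h (n ^^^ 2^i) unfolds with lowest index = pvLowIdx n
      have higt : pvLowIdx n < i := by
        rcases Nat.lt_trichotomy (pvLowIdx n) i with hlt | heq | hgt
        · exact hlt
        · exact absurd heq hit
        · have := pv_testBit_below_lowIdx n i hgt
          rw [this] at hi; exact Bool.noConfusion hi
      have hk : (n ^^^ 2 ^ i).testBit (pvLowIdx n) = true := by
        rw [Nat.testBit_xor, Nat.testBit_two_pow]
        have : ¬ (i = pvLowIdx n) := hit'
        simp [this, pv_testBit_lowIdx n (by omega)]
      have hkb : ∀ j, j < pvLowIdx n → (n ^^^ 2 ^ i).testBit j = false := by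
        intro j hj
        rw [Nat.testBit_xor, Nat.testBit_two_pow]
        have : ¬ (i = j) := by omega
        simp [this, pv_testBit_below_lowIdx n j hj]
      have hlk : pvLowIdx (n ^^^ 2 ^ i) = pvLowIdx n := pv_lowIdx_eq _ _ hk hkb
      have hne : n ^^^ 2 ^ i ≠ 0 := by
        intro hh
        have := congrArg (fun x => Nat.testBit x (pvLowIdx n)) hh
        simp only [Nat.zero_testBit] at this
        rw [hk] at this; exact Bool.noConfusion this
      conv_rhs => rw [pvOrSub]
      simp only [hne, dite_false, hlk]
      congr 1
      rw [Nat.xor_assoc, Nat.xor_comm (2 ^ pvLowIdx n) (2 ^ i), ← Nat.xor_assoc]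

theorem pv_aInner_eq (h : List Int) (nbr : List Int) (s : Nat) (hs : 0 < s)
    (hnbr : ∀ u, u < s → nbr.getD u 0 = pvOrSub h u) :
    ∀ fuel rem, rem ≤ fuel → (∀ j, rem.testBit j = true → s.testBit j = true) →
    pvAInner h nbr s rem fuel =
      (pvBits rem).any (fun i => decide (PySem.Int.band (h.getD i 0) (Int.not (pvOrSub h (s ^^^ 2 ^ i))) ≠ 0)) := by
  intro fuel
  induction fuel with
  | zero =>
    intro rem hle _
    have : rem = 0 := by omega
    subst this
    rw [pvBits]; simp [pvAInner]
  | succ fuel ih =>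
    intro rem hle hsub
    by_cases hrem : rem = 0
    · subst hrem; rw [pvBits]; simp [pvAInner]
    have hrpos : 0 < rem := by omega
    have ht := pv_testBit_lowIdx rem hrpos
    have hge := Nat.ge_two_pow_of_testBit ht
    rw [pvAInner]
    simp only [hrem, ne_eq, not_false_iff, if_true]
    rw [pv_band_neg hrpos, pv_bitLength_two_pow]
    have htn : ((((2 : Nat) ^ pvLowIdx rem : Nat) : Int)).toNat = 2 ^ pvLowIdx rem :=
      Int.toNat_natCast _
    rw [htn]
    have hsbit : s.testBit (pvLowIdx rem) = true := hsub _ ht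
    have hslt : s ^^^ 2 ^ pvLowIdx rem < s := by
      rw [pv_xor_two_pow s _ hsbit]
      have := Nat.two_pow_pos (pvLowIdx rem)
      have := Nat.ge_two_pow_of_testBit hsbit
      omega
    rw [hnbr _ hslt]
    rw [pvBits]
    simp only [hrem, dite_false, List.any_cons, Nat.add_sub_cancel]
    rw [ih (rem ^^^ 2 ^ pvLowIdx rem) (by have := pv_strip_lt hrem; omega)
      (fun j hj => hsub j (by rw [pv_testBit_strip hrem, Bool.and_eq_true] at hj; exact hj.1))]
    by_cases hc : PySem.Int.band (h.getD (pvLowIdx rem) 0) (Int.not (pvOrSub h (s ^^^ 2 ^ pvLowIdx rem))) ≠ 0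
    · simp [hc]
    · simp [hc]

theorem pv_any_congr_mem {α : Type} : ∀ (l : List α) (p q : α → Bool),
    (∀ x ∈ l, p x = q x) → l.any p = l.any q := by
  intro l p q h
  induction l with
  | nil => rfl
  | cons a l ih =>
    simp only [List.any_cons]
    rw [h a (List.mem_cons_self), ih (fun x hx => h x (List.mem_cons_of_mem a hx))]

theorem pv_bFails_eq (h : List Int) (m : Nat) (s : Nat) (hs : 0 < s) (hsm : s < 2 ^ m) :
    pvBFails h m s =
      !((pvBits s).any (fun i => decide (PySem.Int.band (h.getD i 0) (Int.not (pvOrSub h (s ^^^ 2 ^ i))) ≠ 0))) := by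
  rw [pvBFails]
  have hpred : (fun i => decide ((s >>> i) &&& 1 = 1)) = (fun i => s.testBit i) := by
    funext i; simp [Nat.testBit]
  rw [hpred, pv_filter_range_eq_bits s m hsm]
  congr 1
  apply pv_any_congr_mem
  intro x hx
  rw [pv_orExcept_bits h s x ((pv_mem_bits s x).mp hx)]

theorem pv_aGo_eq (h : List Int) (m : Nat) (hm0 : 0 < m) :
    ∀ cnt s nbr, 0 < s → s + cnt = 2 ^ m → nbr.length = 2 ^ m →
    (∀ u, u < s → nbr.getD u 0 = pvOrSub h u) →
    pvAGo h nbr ((s : Int) - 1) s cnt =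
      (match (List.range' s cnt).find? (pvBFails h m) with
       | some u => (false, (u : Int), (u : Int))
       | none => (true, ((2 ^ m - 1 : Nat) : Int), 0)) := by
  intro cnt
  induction cnt with
  | zero =>
    intro s nbr hs hsum hlen hinv
    simp only [pvAGo, List.range'_zero, List.find?_nil]
    have : ((2 ^ m - 1 : Nat) : Int) = (s : Int) - 1 := by
      have : 0 < 2 ^ m := Nat.two_pow_pos m
      omega
    rw [this]
  | succ cnt ih =>
    intro s nbr hs hsum hlen hinv
    have hsm : s < 2 ^ m := by omega
    have ht := pv_testBit_lowIdx s hs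
    have hge := Nat.ge_two_pow_of_testBit ht
    rw [pvAGo]
    rw [pv_band_neg hs, pv_bitLength_two_pow]
    have htn : ((((2 : Nat) ^ pvLowIdx s : Nat) : Int)).toNat = 2 ^ pvLowIdx s :=
      Int.toNat_natCast _
    rw [htn]
    simp only [Nat.add_sub_cancel]
    have hprevlt : s ^^^ 2 ^ pvLowIdx s < s := pv_strip_lt (by omega)
    rw [hinv _ hprevlt]
    have hval : PySem.Int.bor (pvOrSub h (s ^^^ 2 ^ pvLowIdx s)) (h.getD (pvLowIdx s) 0) = pvOrSub h s := by
      conv_rhs => rw [pvOrSub]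
      simp only [Nat.pos_iff_ne_zero.mp hs, dite_false]
    rw [hval]
    have hlen' : (nbr.set s (pvOrSub h s)).length = 2 ^ m := by
      rw [List.length_set]; exact hlen
    have hinv' : ∀ u, u < s + 1 → (nbr.set s (pvOrSub h s)).getD u 0 = pvOrSub h u := by
      intro u hu
      rw [List.getD_eq_getElem?_getD]
      by_cases husu : u = s
      · subst husu
        rw [List.getElem?_set_self (by omega)]
        rfl
      · rw [List.getElem?_set_ne (fun hh => husu hh.symm), ← List.getD_eq_getElem?_getD]
        exact hinv u (by omega)
    have hinner := pv_aInner_eq h (nbr.set s (pvOrSub h s)) s hs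
      (fun u hu => hinv' u (by omega)) s s (le_refl s) (fun j hj => hj)
    rw [hinner]
    rw [List.range'_succ]
    by_cases hany : (pvBits s).any (fun i => decide (PySem.Int.band (h.getD i 0) (Int.not (pvOrSub h (s ^^^ 2 ^ i))) ≠ 0)) = true
    · -- subset s passes: B's find? skips s
      have hbf : pvBFails h m s = false := by
        rw [pv_bFails_eq h m s hs hsm, hany]; rfl
      rw [List.find?_cons_of_neg (by simp [hbf]), hany]
      simp only [if_true]
      have hcast : ((s : Int) - 1 + 1) = ((s + 1 : Nat) : Int) - 1 := by push_cast; ring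
      rw [hcast]
      exact ih (s + 1) _ (by omega) (by omega) hlen' hinv'
    · have hbf : pvBFails h m s = true := by
        rw [pv_bFails_eq h m s hs hsm]
        simp only [Bool.not_eq_true] at hany
        rw [hany]; rfl
      rw [List.find?_cons_of_pos (by simp [hbf])]
      simp only [Bool.not_eq_true] at hany
      rw [hany]
      simp only [Bool.false_eq_true, if_false]
      have : ((s : Int) - 1 + 1) = (s : Int) := by ring
      rw [this]

theorem pv_main_eq (h : List Int) :
    has_private_neighbor_for_all_subsets h = has_private_neighbor_for_all_subsets_alt h := by
  rw [has_private_neighbor_for_all_subsets, has_private_neighbor_for_all_subsets_alt]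
  by_cases hm : h.length = 0
  · simp [hm]
  · simp only [hm, if_false]
    have hsh : (1 <<< h.length) = 2 ^ h.length := Nat.one_shiftLeft _
    rw [hsh]
    have h2 : 0 < 2 ^ h.length := Nat.two_pow_pos _
    have hz : (0 : Int) = ((1 : Nat) : Int) - 1 := by norm_num
    rw [hz]
    rw [pv_aGo_eq h h.length (by omega) (2 ^ h.length - 1) 1 _ (by omega) (by omega)
      (by rw [List.length_replicate])
      (by
        intro u hu
        have : u = 0 := by omega
        subst this
        rw [List.getD_replicate _ h2, pvOrSub]
        simp)]
    cases List.find? (pvBFails h h.length) (List.range' 1 (2 ^ h.length - 1)) with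
    | none => norm_num
    | some u => rfl


-- ===== VERDICT (by name: the statement is the Claim_ definition above) =====
theorem has_private_neighbor_for_all_subsets_spec : Claim_equal_has_private_neighbor_for_all_subsets := by
  intro h_masks _
  unfold Spec_has_private_neighbor_for_all_subsets
  exact pv_main_eq h_masks
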